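-- pv_equiv track=rewrite | github.com/richardjcool/CodingTutorials | InterviewPrep/shuffle_string.py | most_common_in_dict
-- ===== SOURCE A (Python) =====
-- def most_common_in_dict(dict, notthis=None):
--
--     maxval = 0
--     maxletter = ''
--
--     for key, value in dict.items():
--         if (value > maxval) & (key != notthis):
--             maxval = value
--             maxletter = key
--     return maxletter
-- ===== SOURCE B (Python) =====
-- def most_common_in_dict(dict, notthis=None):
--     # Two-pass: compute the max eligible value, then return the first key holding it.
--     best = max((v for k, v in dict.items() if v > 0 and k != notthis), default=0)
--     if best == 0:
--         return ''
--     for k, v in dict.items():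
--         if v == best and k != notthis:
--             return k
-- ===== Notes on version B (the rewrite author's own statement) =====
-- stated objective: alternative
-- what changed: Replaces the single-pass (maxval, maxletter) accumulator scan with a two-pass decomposition: first compute the maximum eligible value with max(..., default=0), then return the first key that carries it.
import Mathlib
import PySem

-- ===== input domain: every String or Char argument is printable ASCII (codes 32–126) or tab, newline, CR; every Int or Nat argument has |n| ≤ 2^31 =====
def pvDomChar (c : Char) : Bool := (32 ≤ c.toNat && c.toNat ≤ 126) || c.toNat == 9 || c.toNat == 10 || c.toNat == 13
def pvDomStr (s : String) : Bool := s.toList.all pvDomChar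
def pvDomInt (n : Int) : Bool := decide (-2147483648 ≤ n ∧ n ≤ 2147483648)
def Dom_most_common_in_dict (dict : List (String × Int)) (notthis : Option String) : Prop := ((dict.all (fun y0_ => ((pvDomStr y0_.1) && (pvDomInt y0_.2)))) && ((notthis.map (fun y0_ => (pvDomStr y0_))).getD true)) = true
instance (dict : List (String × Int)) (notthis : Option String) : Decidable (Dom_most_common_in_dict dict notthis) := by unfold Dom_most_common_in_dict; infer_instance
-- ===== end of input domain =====

-- B replaces A's single-pass (maxval, maxletter) accumulator with a two-pass
-- max-then-find decomposition; same cost, proved to return the same string.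


-- ===== PORT A =====
-- literal port: fold over the items carrying (maxval, maxletter)
def most_common_in_dict (dict : List (String × Int)) (notthis : Option String) : String :=
  (dict.foldl
    (fun (st : Int × String) kv =>
      if st.1 < kv.2 ∧ some kv.1 ≠ notthis then (kv.2, kv.1) else st)
    ((0 : Int), "")).2

-- ===== PORT B =====
-- literal port of Source B: max(..., default=0) over the eligible values, then the
-- first key carrying that value (the `none` branch is unreachable when best ≠ 0)
def most_common_in_dict_alt (dict : List (String × Int)) (notthis : Option String) : String :=
  let best :=
    ((dict.filter (fun kv => decide (0 < kv.2) && decide (some kv.1 ≠ notthis))).map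
      (fun kv => kv.2)).foldl max 0
  if best = 0 then ""
  else
    match dict.find? (fun kv => decide (kv.2 = best) && decide (some kv.1 ≠ notthis)) with
    | some kv => kv.1
    | none => ""

-- ===== PRECONDITION & SPEC =====
def Spec_most_common_in_dict (dict : List (String × Int)) (notthis : Option String) (out : String) : Prop := out = most_common_in_dict_alt dict notthis
instance (dict : List (String × Int)) (notthis : Option String) (out : String) : Decidable (Spec_most_common_in_dict dict notthis out) := by unfold Spec_most_common_in_dict; infer_instance

-- ===== CLAIM (what is proved, stated in full; the proofs are below) =====
def Claim_equal_most_common_in_dict : Prop := ∀ (dict : List (String × Int)) (notthis : Option String), Dom_most_common_in_dict dict notthis → Spec_most_common_in_dict dict notthis (most_common_in_dict dict notthis)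

-- ===== LEMMAS AND PROOFS =====

-- running maximum of A's fold, written directly
def pvMaxf (notthis : Option String) (m : Int) : List (String × Int) → Int
  | [] => m
  | kv :: xs => pvMaxf notthis (if some kv.1 ≠ notthis then max m kv.2 else m) xs

lemma pvMaxf_mono (notthis : Option String) (xs : List (String × Int)) (m : Int) :
    m ≤ pvMaxf notthis m xs := by
  induction xs generalizing m with
  | nil => simp [pvMaxf]
  | cons kv xs ih =>
    simp only [pvMaxf]
    split
    · exact le_trans (le_max_left _ _) (ih _)
    · exact ih _

-- the second component of A's fold: the first key carrying the final maximum,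
-- provided that maximum beats the initial accumulator
lemma foldA_snd (notthis : Option String) (xs : List (String × Int)) (m : Int) (l : String) :
    (xs.foldl
      (fun (st : Int × String) kv =>
        if st.1 < kv.2 ∧ some kv.1 ≠ notthis then (kv.2, kv.1) else st)
      (m, l)).2 =
      if m < pvMaxf notthis m xs then
        (((xs.find? (fun kv => decide (kv.2 = pvMaxf notthis m xs) && decide (some kv.1 ≠ notthis))).map
          (fun kv => kv.1)).getD "")
      else l := by
  induction xs generalizing m l with
  | nil => simp [pvMaxf]
  | cons kv xs ih =>
    by_cases hok : some kv.1 ≠ notthis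
    · by_cases hgt : m < kv.2
      · -- update happens
        have hmax : max m kv.2 = kv.2 := max_eq_right (le_of_lt hgt)
        have hM : pvMaxf notthis m (kv :: xs) = pvMaxf notthis kv.2 xs := by
          simp [pvMaxf, hok, hmax]
        have hge : kv.2 ≤ pvMaxf notthis kv.2 xs := pvMaxf_mono _ _ _
        have hcond : m < pvMaxf notthis m (kv :: xs) := by
          rw [hM]; exact lt_of_lt_of_le hgt hge
        have h1 : (if m < kv.2 ∧ some kv.1 ≠ notthis then (kv.2, kv.1) else (m, l)) = (kv.2, kv.1) :=
          if_pos ⟨hgt, hok⟩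
        have hcond' : m < pvMaxf notthis kv.2 xs := hM ▸ hcond
        rw [List.foldl_cons, h1, ih, hM, if_pos hcond']
        rcases lt_or_eq_of_le hge with hlt | heq
        · -- the maximum is found later: kv does not match the find predicate
          have hne : kv.2 ≠ pvMaxf notthis kv.2 xs := ne_of_lt hlt
          simp [hne, if_pos hlt]
        · -- kv itself carries the maximum
          simp [← heq, hok]
      · -- ok key but not larger: accumulator unchanged, max unchanged
        have hle : kv.2 ≤ m := le_of_not_gt hgt
        have hmax : max m kv.2 = m := max_eq_left hle
        have hM : pvMaxf notthis m (kv :: xs) = pvMaxf notthis m xs := by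
          simp [pvMaxf, hok, hmax]
        have hcond : ¬ (m < kv.2 ∧ some kv.1 ≠ notthis) := fun h => hgt h.1
        have h1 : (if m < kv.2 ∧ some kv.1 ≠ notthis then (kv.2, kv.1) else (m, l)) = (m, l) :=
          if_neg hcond
        rw [List.foldl_cons, h1, ih, hM]
        by_cases hbig : m < pvMaxf notthis m xs
        · have hne : kv.2 ≠ pvMaxf notthis m xs := ne_of_lt (lt_of_le_of_lt hle hbig)
          simp [hne, if_pos hbig]
        · simp [if_neg hbig]
    · -- excluded key: no update, no effect on max, never found
      have hcond : ¬ (m < kv.2 ∧ some kv.1 ≠ notthis) := fun h => hok h.2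
      have hM : pvMaxf notthis m (kv :: xs) = pvMaxf notthis m xs := by
        simp [pvMaxf, hok]
      have h1 : (if m < kv.2 ∧ some kv.1 ≠ notthis then (kv.2, kv.1) else (m, l)) = (m, l) :=
        if_neg hcond
      rw [List.foldl_cons, h1, ih, hM]
      by_cases hbig : m < pvMaxf notthis m xs
      · simp [hok, if_pos hbig]
      · simp [if_neg hbig]

-- B's first pass equals A's running maximum started at any nonnegative value
lemma best_eq_maxf (notthis : Option String) (xs : List (String × Int)) (m : Int) (hm : 0 ≤ m) :
    ((xs.filter (fun kv => decide (0 < kv.2) && decide (some kv.1 ≠ notthis))).map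
      (fun kv => kv.2)).foldl max m = pvMaxf notthis m xs := by
  induction xs generalizing m with
  | nil => simp [pvMaxf]
  | cons kv xs ih =>
    by_cases hok : some kv.1 ≠ notthis
    · by_cases hpos : 0 < kv.2
      · have hf : (kv :: xs).filter (fun kv => decide (0 < kv.2) && decide (some kv.1 ≠ notthis))
            = kv :: xs.filter (fun kv => decide (0 < kv.2) && decide (some kv.1 ≠ notthis)) := by
          simp [hpos, hok]
        rw [hf, List.map_cons, List.foldl_cons]
        simp only [pvMaxf, if_pos hok]
        exact ih _ (le_trans hm (le_max_left _ _))
      · have hf : (kv :: xs).filter (fun kv => decide (0 < kv.2) && decide (some kv.1 ≠ notthis))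
            = xs.filter (fun kv => decide (0 < kv.2) && decide (some kv.1 ≠ notthis)) := by
          simp [hpos]
        have hmax : max m kv.2 = m := max_eq_left (le_trans (le_of_not_gt hpos) hm)
        rw [hf]
        simp only [pvMaxf, if_pos hok, hmax]
        exact ih m hm
    · have hf : (kv :: xs).filter (fun kv => decide (0 < kv.2) && decide (some kv.1 ≠ notthis))
          = xs.filter (fun kv => decide (0 < kv.2) && decide (some kv.1 ≠ notthis)) := by
        simp [hok]
      rw [hf]
      simp only [pvMaxf, if_neg hok]
      exact ih m hm

-- ===== VERDICT (by name: the statement is the Claim_ definition above) =====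
theorem most_common_in_dict_spec : Claim_equal_most_common_in_dict := by
  intro dict notthis _
  unfold Spec_most_common_in_dict most_common_in_dict most_common_in_dict_alt
  rw [foldA_snd, best_eq_maxf notthis dict 0 le_rfl]
  have hge : (0 : Int) ≤ pvMaxf notthis 0 dict := pvMaxf_mono _ _ _
  by_cases h : (0 : Int) < pvMaxf notthis 0 dict
  · have hne : pvMaxf notthis 0 dict ≠ 0 := ne_of_gt h
    simp only [if_pos h, if_neg hne]
    cases hfind : dict.find? (fun kv => decide (kv.2 = pvMaxf notthis 0 dict) && decide (some kv.1 ≠ notthis)) with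
    | none => simp [hfind]
    | some kv => simp [hfind]
  · have heq : pvMaxf notthis 0 dict = 0 := le_antisymm (le_of_not_gt h) hge
    simp [heq]
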